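-- pv_equiv track=rewrite | github.com/Dimon0014/podchet_povtorov | podchet_dvoek_17__1_k_3_ver_2.py | podchet_shansov_k_3
-- ===== SOURCE A (Python) =====
-- def podchet_shansov_k_3(list):
--     list2 =[0, 0, 0, 0]
--     nulik = 0
--     ferst=0
--     second = 0
--     ferd = 0
--     i =0
--     for i in range(len(list)):
--         if (list[i][0][1] == 0):
--             nulik = nulik + list[i][1]
--         elif (list[i][0][1] == 1) or (list[i][0][1] == 4) or (list[i][0][1] == 7) or (list[i][0][1] == 10) or (
--                     list[i][0][1] == 13) or (list[i][0][1] == 16) or (list[i][0][1] == 19) or (list[i][0][1] == 22) or (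
--                     list[i][0][1] == 25) or (list[i][0][1] == 28) or (list[i][0][1] == 31) or (list[i][0][1] == 34):
--             ferst = ferst+ list[i][1]
--         elif (list[i][0][1] == 2) or (list[i][0][1] == 5) or (list[i][0][1] == 8) or (list[i][0][1] == 11) or (
--                     list[i][0][1] == 14) or (list[i][0][1] == 17) or (list[i][0][1] == 20) or (list[i][0][1] == 23) or (
--                     list[i][0][1] == 26) or (list[i][0][1] == 29) or (list[i][0][1] == 32) or (list[i][0][1] == 35):
--             second = second + list[i][1]
--         elif (list[i][0][1] == 3) or (list[i][0][1] == 6) or (list[i][0][1] == 9) or (list[i][0][1] == 12) or (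
--                     list[i][0][1] == 15) or (list[i][0][1] == 18) or (list[i][0][1] == 21) or (list[i][0][1] == 24) or (
--                     list[i][0][1] == 27) or (list[i][0][1] == 30) or (list[i][0][1] == 33) or (list[i][0][1] == 36):
--             ferd = ferd + list[i][1]
--     list2[0] = nulik
--     list2[1] = ferst
--     list2[2] = second
--     list2[3] = ferd
--     return list2
-- ===== SOURCE B (Python) =====
-- def podchet_shansov_k_3(list):
--     def tot(p):
--         return sum(w for (_, k), w in list if p(k))
--     return [tot(lambda k: k == 0),
--             tot(lambda k: 1 <= k <= 36 and k % 3 == 1),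
--             tot(lambda k: 1 <= k <= 36 and k % 3 == 2),
--             tot(lambda k: 1 <= k <= 36 and k % 3 == 0)]
-- ===== Notes on version B (the rewrite author's own statement) =====
-- stated objective: simpler
-- what changed: Instead of one stateful pass with a 37-case equality cascade over four scalar accumulators, B builds the result as four independent filtered sums (one scan per bucket, each bucket characterised by a range-and-residue predicate).
import Mathlib
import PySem

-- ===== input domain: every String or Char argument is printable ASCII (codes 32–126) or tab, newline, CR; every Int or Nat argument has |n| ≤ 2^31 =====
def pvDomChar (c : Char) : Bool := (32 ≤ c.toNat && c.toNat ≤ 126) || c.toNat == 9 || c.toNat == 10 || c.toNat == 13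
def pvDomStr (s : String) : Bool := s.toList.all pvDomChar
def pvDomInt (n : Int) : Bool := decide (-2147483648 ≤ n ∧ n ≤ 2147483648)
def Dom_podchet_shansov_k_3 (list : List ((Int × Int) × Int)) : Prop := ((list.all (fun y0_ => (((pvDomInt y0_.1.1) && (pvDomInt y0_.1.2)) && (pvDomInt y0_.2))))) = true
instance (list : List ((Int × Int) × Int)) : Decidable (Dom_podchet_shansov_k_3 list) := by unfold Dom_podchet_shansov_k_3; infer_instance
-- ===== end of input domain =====

-- B replaces A's single stateful pass with its 37-case equality cascade by four independent
-- filtered sums, one scan per bucket (objective: simpler; same return value).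

-- ===== PORT A =====
-- one loop iteration: the if/elif cascade updating (nulik, ferst, second, ferd)
def pvStepA (st : Int × Int × Int × Int) (e : (Int × Int) × Int) : Int × Int × Int × Int :=
  let k := e.1.2
  let w := e.2
  let (nulik, ferst, second, ferd) := st
  if k = 0 then (nulik + w, ferst, second, ferd)
  else if k = 1 ∨ k = 4 ∨ k = 7 ∨ k = 10 ∨ k = 13 ∨ k = 16 ∨ k = 19 ∨ k = 22 ∨ k = 25 ∨ k = 28 ∨ k = 31 ∨ k = 34 then
    (nulik, ferst + w, second, ferd)
  else if k = 2 ∨ k = 5 ∨ k = 8 ∨ k = 11 ∨ k = 14 ∨ k = 17 ∨ k = 20 ∨ k = 23 ∨ k = 26 ∨ k = 29 ∨ k = 32 ∨ k = 35 then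
    (nulik, ferst, second + w, ferd)
  else if k = 3 ∨ k = 6 ∨ k = 9 ∨ k = 12 ∨ k = 15 ∨ k = 18 ∨ k = 21 ∨ k = 24 ∨ k = 27 ∨ k = 30 ∨ k = 33 ∨ k = 36 then
    (nulik, ferst, second, ferd + w)
  else st

def podchet_shansov_k_3 (list : List ((Int × Int) × Int)) : List Int :=
  let st := list.foldl pvStepA (0, 0, 0, 0)
  [st.1, st.2.1, st.2.2.1, st.2.2.2]

-- ===== PORT B =====
-- tot(p) of Source B: sum of the weights of the elements whose key satisfies p
def pvTot (p : Int → Bool) (l : List ((Int × Int) × Int)) : Int :=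
  ((l.filter (fun e => p e.1.2)).map (fun e => e.2)).sum

-- the four bucket predicates of Source B (k % 3 with positive divisor = Python %)
def pvP0 (k : Int) : Bool := k == 0
def pvP1 (k : Int) : Bool := decide (1 ≤ k ∧ k ≤ 36 ∧ PySem.Int.mod k 3 = 1)
def pvP2 (k : Int) : Bool := decide (1 ≤ k ∧ k ≤ 36 ∧ PySem.Int.mod k 3 = 2)
def pvP3 (k : Int) : Bool := decide (1 ≤ k ∧ k ≤ 36 ∧ PySem.Int.mod k 3 = 0)

def podchet_shansov_k_3_alt (list : List ((Int × Int) × Int)) : List Int :=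
  [pvTot pvP0 list, pvTot pvP1 list, pvTot pvP2 list, pvTot pvP3 list]

-- ===== PRECONDITION & SPEC =====
def Spec_podchet_shansov_k_3 (list : List ((Int × Int) × Int)) (out : List Int) : Prop := out = podchet_shansov_k_3_alt list
instance (list : List ((Int × Int) × Int)) (out : List Int) : Decidable (Spec_podchet_shansov_k_3 list out) := by unfold Spec_podchet_shansov_k_3; infer_instance

-- ===== CLAIM (what is proved, stated in full; the proofs are below) =====
def Claim_equal_podchet_shansov_k_3 : Prop := ∀ (list : List ((Int × Int) × Int)), Dom_podchet_shansov_k_3 list → Spec_podchet_shansov_k_3 list (podchet_shansov_k_3 list)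

-- ===== LEMMAS AND PROOFS =====
theorem pvTot_cons (p : Int → Bool) (x k w : Int) (t : List ((Int × Int) × Int)) :
    pvTot p (((x, k), w) :: t) = (if p k then w else 0) + pvTot p t := by
  simp only [pvTot, List.filter_cons]
  split <;> simp

-- A's fold from an arbitrary state adds exactly the four bucket sums of B
theorem pvFoldA_eq (l : List ((Int × Int) × Int)) (a b c d : Int) :
    l.foldl pvStepA (a, b, c, d) =
      (a + pvTot pvP0 l, b + pvTot pvP1 l, c + pvTot pvP2 l, d + pvTot pvP3 l) := by
  induction l generalizing a b c d with
  | nil => simp [pvTot]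
  | cons e t ih =>
      obtain ⟨⟨x, k⟩, w⟩ := e
      rw [List.foldl_cons]
      simp only [pvStepA]
      split_ifs with h0 h1 h2 h3
      · have e0 : pvP0 k = true := by simp [pvP0]; omega
        have e1 : pvP1 k = false := by simp [pvP1]; omega
        have e2 : pvP2 k = false := by simp [pvP2]; omega
        have e3 : pvP3 k = false := by simp [pvP3]; omega
        rw [ih, pvTot_cons, pvTot_cons, pvTot_cons, pvTot_cons, e0, e1, e2, e3]
        simp [add_assoc]
      · have e0 : pvP0 k = false := by simp [pvP0]; omega
        have e1 : pvP1 k = true := by simp [pvP1]; omega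
        have e2 : pvP2 k = false := by simp [pvP2]; omega
        have e3 : pvP3 k = false := by simp [pvP3]; omega
        rw [ih, pvTot_cons, pvTot_cons, pvTot_cons, pvTot_cons, e0, e1, e2, e3]
        simp [add_assoc]
      · have e0 : pvP0 k = false := by simp [pvP0]; omega
        have e1 : pvP1 k = false := by simp [pvP1]; omega
        have e2 : pvP2 k = true := by simp [pvP2]; omega
        have e3 : pvP3 k = false := by simp [pvP3]; omega
        rw [ih, pvTot_cons, pvTot_cons, pvTot_cons, pvTot_cons, e0, e1, e2, e3]
        simp [add_assoc]
      · have e0 : pvP0 k = false := by simp [pvP0]; omega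
        have e1 : pvP1 k = false := by simp [pvP1]; omega
        have e2 : pvP2 k = false := by simp [pvP2]; omega
        have e3 : pvP3 k = true := by simp [pvP3]; omega
        rw [ih, pvTot_cons, pvTot_cons, pvTot_cons, pvTot_cons, e0, e1, e2, e3]
        simp [add_assoc]
      · have e0 : pvP0 k = false := by simp [pvP0]; omega
        have e1 : pvP1 k = false := by simp [pvP1]; omega
        have e2 : pvP2 k = false := by simp [pvP2]; omega
        have e3 : pvP3 k = false := by simp [pvP3]; omega
        rw [ih, pvTot_cons, pvTot_cons, pvTot_cons, pvTot_cons, e0, e1, e2, e3]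
        simp

-- ===== VERDICT (by name: the statement is the Claim_ definition above) =====
theorem podchet_shansov_k_3_spec : Claim_equal_podchet_shansov_k_3 := by
  intro l _
  show podchet_shansov_k_3 l = podchet_shansov_k_3_alt l
  simp only [podchet_shansov_k_3, podchet_shansov_k_3_alt, pvFoldA_eq l 0 0 0 0]
  norm_num
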